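-- pv_equiv track=rewrite | github.com/iai-group/crs-knowledge | scripts/filter_conversations.py | deduplicate_selected_messages
-- ===== SOURCE A (Python) =====
-- from typing import List
--
-- def deduplicate_selected_messages(messages: List[dict]) -> List[dict]:
--     """Deduplicate consecutive 'Great! You've selected' messages.
--
--     Keeps only the last one in each consecutive sequence.
--     """
--     deduplicated = []
--     i = 0
--     while i < len(messages):
--         msg = messages[i]
--         role = (msg.get("role") or "").strip().lower()
--         content = msg.get("content") or ""
--
--         # Check if this is an agent message starting with "Great! You've selected"
--         if role in (
--             "assistant",
--             "ai",
--             "agent",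
--         ) and content.strip().startswith("Great! You've selected"):
--             # Look ahead to find consecutive similar messages
--             j = i
--             while j < len(messages):
--                 next_msg = messages[j]
--                 next_role = (next_msg.get("role") or "").strip().lower()
--                 next_content = next_msg.get("content") or ""
--
--                 # Stop if we hit a user message, system message, or a different type of agent message
--                 if next_role in ("human", "user", "participant", "system"):
--                     break
--                 if next_role in (
--                     "assistant",
--                     "ai",
--                     "agent",
--                 ) and not next_content.strip().startswith(
--                     "Great! You've selected"
--                 ):
--                     break
--                 j += 1
--
--             # Keep only the last "Great! You've selected" message before the user/different message
--             if j > i + 1: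
--                 # Multiple consecutive "Great! You've selected" messages found
--                 # Keep only the one at position j-1
--                 deduplicated.append(messages[j - 1])
--                 i = j
--             else:
--                 # Just one message, keep it
--                 deduplicated.append(msg)
--                 i += 1
--         else:
--             deduplicated.append(msg)
--             i += 1
--
--     return deduplicated
-- ===== SOURCE B (Python) =====
-- from typing import List
--
-- _AGENT_ROLES = {"assistant", "ai", "agent"}
-- _USER_ROLES = {"human", "user", "participant", "system"}
--
--
-- def _role(msg: dict) -> str:
--     return (msg.get("role") or "").strip().lower()
--
--
-- def _is_great(msg: dict) -> bool:
--     return _role(msg) in _AGENT_ROLES and (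
--         msg.get("content") or ""
--     ).strip().startswith("Great! You've selected")
--
--
-- def _is_boundary(msg: dict) -> bool:
--     r = _role(msg)
--     return r in _USER_ROLES or (r in _AGENT_ROLES and not _is_great(msg))
--
--
-- def deduplicate_selected_messages(messages: List[dict]) -> List[dict]:
--     """Deduplicate consecutive 'Great! You've selected' messages.
--
--     Single linear pass keeping a pending candidate for the last element of
--     the current run instead of look-ahead index jumping.
--     """
--     out = []
--     pending = None  # last message of the run currently being swallowed
--     for msg in messages:
--         if _is_great(msg):
--             pending = msg
--         elif pending is None:
--             out.append(msg)
--         elif _is_boundary(msg):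
--             out.append(pending)
--             out.append(msg)
--             pending = None
--         else:
--             pending = msg
--     if pending is not None:
--         out.append(pending)
--     return out
-- ===== Notes on version B (the rewrite author's own statement) =====
-- stated objective: simpler
-- what changed: Replaced the nested while loop with index jumping (i=j) and a re-scanning look-ahead by a single linear for-loop over the messages that carries a 'pending' candidate for the last element of the current run and flushes it at a boundary or at the end.
import Mathlib
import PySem

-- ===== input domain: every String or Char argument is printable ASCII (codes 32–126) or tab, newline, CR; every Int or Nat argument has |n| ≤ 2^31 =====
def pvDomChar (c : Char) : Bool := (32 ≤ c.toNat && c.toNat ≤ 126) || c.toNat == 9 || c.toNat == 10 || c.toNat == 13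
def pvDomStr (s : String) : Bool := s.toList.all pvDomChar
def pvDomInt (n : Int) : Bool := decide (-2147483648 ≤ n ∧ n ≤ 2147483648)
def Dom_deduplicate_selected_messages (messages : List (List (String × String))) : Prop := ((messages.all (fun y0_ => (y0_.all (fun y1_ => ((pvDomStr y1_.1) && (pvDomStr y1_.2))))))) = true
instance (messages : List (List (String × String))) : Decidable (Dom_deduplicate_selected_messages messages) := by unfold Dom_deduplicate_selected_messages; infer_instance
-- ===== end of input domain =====

-- B replaces A's nested while loop with index jumps by one linear pass carrying a
-- 'pending' last-of-run candidate (objective: simpler). Return values only; neither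
-- program mutates its argument.

-- shared message classification (A computes these expressions inline; B's Python has them as helpers)
def pvRole (msg : List (String × String)) : String :=
  PySem.Str.lower (PySem.Str.strip ((PySem.Dict.mk msg).getD "role" ""))

def pvContent (msg : List (String × String)) : String :=
  (PySem.Dict.mk msg).getD "content" ""

def pvAgentRole (msg : List (String × String)) : Bool :=
  pvRole msg == "assistant" || pvRole msg == "ai" || pvRole msg == "agent"

def pvUserRole (msg : List (String × String)) : Bool :=
  pvRole msg == "human" || pvRole msg == "user" || pvRole msg == "participant" || pvRole msg == "system"

def pvGreat (msg : List (String × String)) : Bool :=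
  pvAgentRole msg && PySem.Str.startswith (PySem.Str.strip (pvContent msg)) "Great! You've selected"

def pvBoundary (msg : List (String × String)) : Bool :=
  pvUserRole msg || (pvAgentRole msg && !pvGreat msg)

-- ===== PORT A =====
-- inner 'while j < len(messages)' look-ahead of A
def pvScanJ (messages : List (List (String × String))) (j : Nat) : Nat :=
  if h : j < messages.length then
    let next_msg := messages[j]
    if pvUserRole next_msg then j
    else if pvAgentRole next_msg && !pvGreat next_msg then j
    else pvScanJ messages (j + 1)
  else j
termination_by messages.length - j

-- outer 'while i < len(messages)' of A (output built by cons instead of append)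
def pvLoopA (messages : List (List (String × String))) (i : Nat) : List (List (String × String)) :=
  if h : i < messages.length then
    let msg := messages[i]
    if pvGreat msg then
      let j := pvScanJ messages i
      if hj : i + 1 < j then
        messages.getD (j - 1) [] :: pvLoopA messages j
      else
        msg :: pvLoopA messages (i + 1)
    else msg :: pvLoopA messages (i + 1)
  else []
termination_by messages.length - i
decreasing_by all_goals omega

def deduplicate_selected_messages (messages : List (List (String × String))) : List (List (String × String)) :=
  pvLoopA messages 0

-- ===== PORT B =====
-- one step of B's for-loop; state = (out, pending)
def pvStepB (st : List (List (String × String)) × Option (List (String × String)))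
    (msg : List (String × String)) :
    List (List (String × String)) × Option (List (String × String)) :=
  if pvGreat msg then (st.1, some msg)
  else
    match st.2 with
    | none => (st.1 ++ [msg], none)
    | some p => if pvBoundary msg then (st.1 ++ [p, msg], none) else (st.1, some msg)

def deduplicate_selected_messages_alt (messages : List (List (String × String))) : List (List (String × String)) :=
  let st := messages.foldl pvStepB ([], none)
  match st.2 with
  | some p => st.1 ++ [p]
  | none => st.1

-- ===== PRECONDITION & SPEC =====
def Spec_deduplicate_selected_messages (messages : List (List (String × String))) (out : List (List (String × String))) : Prop := out = deduplicate_selected_messages_alt messages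
instance (messages : List (List (String × String))) (out : List (List (String × String))) : Decidable (Spec_deduplicate_selected_messages messages out) := by unfold Spec_deduplicate_selected_messages; infer_instance

-- ===== CLAIM (what is proved, stated in full; the proofs are below) =====
def Claim_equal_deduplicate_selected_messages : Prop := ∀ (messages : List (List (String × String))), Dom_deduplicate_selected_messages messages → Spec_deduplicate_selected_messages messages (deduplicate_selected_messages messages)

-- ===== LEMMAS AND PROOFS =====

-- abstract rewriting of B's fold: the list that B's pass produces
def pvRunB (ms : List (List (String × String))) (pending : Option (List (String × String))) : List (List (String × String)) :=
  match ms with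
  | [] => match pending with | none => [] | some p => [p]
  | m :: rest =>
    if pvGreat m then pvRunB rest (some m)
    else
      match pending with
      | none => m :: pvRunB rest none
      | some p => if pvBoundary m then p :: m :: pvRunB rest none else pvRunB rest (some m)

theorem pv_user_not_agent (m : List (String × String)) (h : pvUserRole m = true) :
    pvAgentRole m = false := by
  have hr : ((pvRole m = "human" ∨ pvRole m = "user") ∨ pvRole m = "participant") ∨ pvRole m = "system" := by
    simpa [pvUserRole] using h
  unfold pvAgentRole
  rcases hr with ((h | h) | h) | h <;> rw [h] <;> decide

theorem pv_great_not_boundary (m : List (String × String)) (h : pvGreat m = true) :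
    pvBoundary m = false := by
  have ha : pvAgentRole m = true := by
    have := h; unfold pvGreat at this; simp only [Bool.and_eq_true] at this; exact this.1
  unfold pvBoundary
  rw [h]
  cases hu : pvUserRole m with
  | false => simp
  | true => exact absurd ha (by simp [pv_user_not_agent m hu])

theorem pv_boundary_not_great (m : List (String × String)) (h : pvBoundary m = true) :
    pvGreat m = false := by
  cases hg : pvGreat m with
  | false => rfl
  | true => exact absurd h (by simp [pv_great_not_boundary m hg])

-- B's fold equals pvRunB
theorem pv_fold_runB (ms : List (List (String × String))) (out : List (List (String × String)))
    (pending : Option (List (String × String))) :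
    (match (List.foldl pvStepB (out, pending) ms).2 with
      | some p => (List.foldl pvStepB (out, pending) ms).1 ++ [p]
      | none => (List.foldl pvStepB (out, pending) ms).1) = out ++ pvRunB ms pending := by
  induction ms generalizing out pending with
  | nil => cases pending <;> simp [pvRunB]
  | cons m rest ih =>
    simp only [List.foldl_cons]
    by_cases hg : pvGreat m = true
    · simp only [pvRunB, hg, if_pos, pvStepB]
      exact ih out (some m)
    · cases pending with
      | none =>
        simp only [pvRunB, hg, if_false, Bool.false_eq_true, pvStepB]
        rw [ih (out ++ [m]) none]
        simp
      | some p =>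
        by_cases hb : pvBoundary m = true
        · simp only [pvRunB, hg, hb, pvStepB, if_true, if_false, Bool.false_eq_true]
          rw [ih (out ++ [p, m]) none]
          simp
        · simp only [pvRunB, hg, hb, pvStepB, if_false, Bool.false_eq_true]
          exact ih out (some m)

-- scanJ facts
theorem pvScanJ_stop (messages : List (List (String × String))) (i : Nat)
    (h : messages.length ≤ i ∨ ∃ h' : i < messages.length, pvBoundary messages[i] = true) :
    pvScanJ messages i = i := by
  rw [pvScanJ]
  rcases h with h | ⟨h', hb⟩
  · rw [dif_neg (by omega)]
  · rw [dif_pos h']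
    simp only [pvBoundary, Bool.or_eq_true] at hb
    rcases hb with hb | hb
    · simp [hb]
    · simp only [hb, if_true]
      split <;> rfl

theorem pvScanJ_step (messages : List (List (String × String))) (i : Nat)
    (h : i < messages.length) (hb : pvBoundary messages[i] = false) :
    pvScanJ messages i = pvScanJ messages (i + 1) := by
  rw [pvScanJ]
  simp only [pvBoundary, Bool.or_eq_false_iff] at hb
  rw [dif_pos h]
  simp [hb.1, hb.2]

theorem pvScanJ_ge (messages : List (List (String × String))) (i : Nat) :
    i ≤ pvScanJ messages i := by
  fun_induction pvScanJ with
  | case1 => omega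
  | case2 => omega
  | case3 _ _ _ _ ih => omega
  | case4 => omega

-- flush: at a stop position, a pending message is emitted first
theorem pv_flush (messages : List (List (String × String))) (j : Nat)
    (p : List (String × String))
    (h : messages.length ≤ j ∨ ∃ h' : j < messages.length, pvBoundary messages[j] = true) :
    pvRunB (messages.drop j) (some p) = p :: pvRunB (messages.drop j) none := by
  rcases h with h | ⟨h', hb⟩
  · rw [List.drop_eq_nil_of_le h]
    simp [pvRunB]
  · rw [List.drop_eq_getElem_cons h']
    have hg := pv_boundary_not_great _ hb
    simp [pvRunB, hg, hb]

-- the run segment: from a non-boundary position, pvRunB keeps exactly the element before scanJ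
theorem pv_run_segment (messages : List (List (String × String))) :
    ∀ n i p, messages.length - i ≤ n → ∀ h' : i < messages.length,
      pvBoundary (messages[i]'h') = false →
      pvRunB (messages.drop i) (some p) =
        messages.getD (pvScanJ messages i - 1) [] :: pvRunB (messages.drop (pvScanJ messages i)) none := by
  intro n
  induction n with
  | zero => intro i p hn h' hb; omega
  | succ n ih =>
    intro i p hn h' hb
    have hs : pvScanJ messages i = pvScanJ messages (i + 1) := pvScanJ_step messages i h' hb
    have hred : pvRunB (messages.drop i) (some p) =
        pvRunB (messages.drop (i + 1)) (some (messages[i]'h')) := by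
      rw [List.drop_eq_getElem_cons h']
      by_cases hg : pvGreat (messages[i]'h') = true <;> simp [pvRunB, hg, hb]
    rw [hred]
    by_cases hstop : messages.length ≤ i + 1 ∨
        ∃ h2 : i + 1 < messages.length, pvBoundary (messages[i+1]'h2) = true
    · have hj : pvScanJ messages (i + 1) = i + 1 := pvScanJ_stop messages (i + 1) hstop
      rw [pv_flush messages (i + 1) _ hstop, hs, hj]
      simp only [Nat.add_sub_cancel, List.getD_eq_getElem messages [] h']
    · push Not at hstop
      obtain ⟨h2, hno⟩ := hstop
      have hb2 : pvBoundary (messages[i+1]'h2) = false := by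
        cases hbb : pvBoundary (messages[i+1]'h2) with
        | false => rfl
        | true => exact absurd hbb (hno h2)
      rw [ih (i + 1) (messages[i]'h') (by omega) h2 hb2, hs]

-- main: A's loop from i equals pvRunB on the suffix
theorem pv_main (messages : List (List (String × String))) :
    ∀ n i, messages.length - i ≤ n →
      pvLoopA messages i = pvRunB (messages.drop i) none := by
  intro n
  induction n with
  | zero =>
    intro i hn
    rw [pvLoopA, dif_neg (by omega), List.drop_eq_nil_of_le (by omega)]
    rfl
  | succ n ih =>
    intro i hn
    by_cases h : i < messages.length
    · rw [pvLoopA, dif_pos h]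
      by_cases hg : pvGreat (messages[i]'h) = true
      · have hb : pvBoundary (messages[i]'h) = false := pv_great_not_boundary _ hg
        have hs : pvScanJ messages i = pvScanJ messages (i + 1) := pvScanJ_step messages i h hb
        have hge : i + 1 ≤ pvScanJ messages i := hs ▸ pvScanJ_ge messages (i + 1)
        have e1 : pvRunB (messages.drop i) none = pvRunB (messages.drop i) (some []) := by
          rw [List.drop_eq_getElem_cons h]
          simp [pvRunB, hg]
        rw [e1, pv_run_segment messages messages.length i [] (by omega) h hb]
        simp only [hg, if_true]
        by_cases hj : i + 1 < pvScanJ messages i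
        · rw [dif_pos hj, ih (pvScanJ messages i) (by omega)]
        · have hj1 : pvScanJ messages i = i + 1 := by omega
          rw [dif_neg hj, ih (i + 1) (by omega), hj1]
          simp only [Nat.add_sub_cancel, List.getD_eq_getElem messages [] h]
      · simp only [hg, Bool.false_eq_true, if_false]
        rw [List.drop_eq_getElem_cons h]
        simp only [pvRunB, hg, Bool.false_eq_true, if_false]
        rw [ih (i + 1) (by omega)]
    · rw [pvLoopA, dif_neg h, List.drop_eq_nil_of_le (by omega)]
      rfl

-- ===== VERDICT (by name: the statement is the Claim_ definition above) =====
theorem deduplicate_selected_messages_spec : Claim_equal_deduplicate_selected_messages := by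
  intro messages _
  unfold Spec_deduplicate_selected_messages deduplicate_selected_messages deduplicate_selected_messages_alt
  have h1 := pv_main messages messages.length 0 (by omega)
  have h2 := pv_fold_runB messages [] none
  simp only [List.drop_zero] at h1
  rw [h1]
  simp only [List.nil_append] at h2
  exact h2.symm
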